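-- pv_equiv track=rewrite | github.com/jramaswami/Binary_Search_Python | longest_concatenated_string.py | solve
-- ===== SOURCE A (Python) =====
-- from collections import defaultdict
--
-- def dfs(wd, acc, first_letter, visited, words, starts_with):
--     result = 0
--     if first_letter == words[wd][-1]:
--         result = acc
--
--     found = False
--     last_letter = words[wd][-1]
--     for wd0 in starts_with[last_letter]:
--         if not visited[wd0] and wd < wd0:
--             visited[wd0] = True
--             found = True
--             result = max(result, dfs(wd0, acc + len(words[wd0]), first_letter, visited, words, starts_with))
--             visited[wd0] = False
--
--     return result
--
-- def solve(words):
--     starts_with = defaultdict(list)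
--     for i, wd in enumerate(words):
--         starts_with[wd[0]].append(i)
--
--     visited = [False for _ in words]
--     result = 0
--     for wd, _ in enumerate(words):
--         visited[wd] = True
--         result = max(result, dfs(wd, len(words[wd]), words[wd][0], visited, words, starts_with))
--         visited[wd] = False
--
--     return result
-- ===== SOURCE B (Python) =====
-- def _cand(best, last, L, t):
--     v = best.get((last, t), 0)
--     c = L + v if v > 0 else 0
--     if t == last:
--         c = max(c, L)
--     return c
--
--
-- def solve(words):
--     # Bottom-up DP over suffixes: best[(c, t)] = max total length of a letter-chain
--     # (strictly increasing indices, each word starting with the previous word's last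
--     # letter) inside the already-processed suffix, whose first word starts with c and
--     # whose last word ends with t; missing key means "no such chain".
--     letters = []
--     for w in words:
--         for ch in (w[0], w[-1]):
--             if ch not in letters:
--                 letters.append(ch)
--     best = {}
--     ans = 0
--     for w in reversed(words):
--         first, last, L = w[0], w[-1], len(w)
--         g = {}
--         for t in letters:
--             c = _cand(best, last, L, t)
--             if c > 0:
--                 g[t] = c
--         a = g.get(first, 0)
--         if a > ans:
--             ans = a
--         for t in letters:
--             u = g.get(t, 0)
--             if u > best.get((first, t), 0):
--                 best[(first, t)] = u
--     return ans
-- ===== Notes on version B (the rewrite author's own statement) =====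
-- stated objective: faster
-- what changed: A enumerates every letter-chain by exhaustive DFS with a visited array; B does one right-to-left dynamic-programming pass maintaining, per (start letter, end letter) pair, the best chain total in the suffix processed so far.
import Mathlib
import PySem

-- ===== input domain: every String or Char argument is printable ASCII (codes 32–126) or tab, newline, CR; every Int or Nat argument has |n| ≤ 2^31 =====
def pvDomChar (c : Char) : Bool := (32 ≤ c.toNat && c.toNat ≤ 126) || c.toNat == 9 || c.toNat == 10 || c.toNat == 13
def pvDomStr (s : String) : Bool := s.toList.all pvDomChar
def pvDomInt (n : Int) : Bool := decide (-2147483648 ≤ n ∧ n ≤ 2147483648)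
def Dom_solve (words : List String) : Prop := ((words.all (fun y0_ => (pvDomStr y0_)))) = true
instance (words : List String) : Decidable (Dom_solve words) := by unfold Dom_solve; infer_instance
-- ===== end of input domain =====

-- B replaces A's exhaustive DFS over letter-chains by one right-to-left DP pass keyed by
-- (start letter, end letter) pairs; the return values are proved equal on lists of nonempty words.

-- ===== PORT A =====
-- shared transliterations of w[0], w[-1], len(w) (total forms; empty strings are outside Pre_)
def pvFirst (s : String) : Char := (PySem.Str.pyGet? s 0).getD ' '
def pvLast (s : String) : Char := (PySem.Str.pyGet? s (-1)).getD ' '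
def pvLen (s : String) : Int := PySem.Str.len s

-- dfs(wd, acc, first_letter, visited, words, starts_with); fuel bounds the recursion depth
-- (indices increase strictly along a chain, so words.length + 1 fuel is never exhausted)
def dfsA (fuel : Nat) (wd : Int) (acc : Int) (firstLetter : Char) (visited : List Bool)
    (words : List String) (startsWith : PySem.Dict Char (List Int)) : Int :=
  match fuel with
  | 0 => 0
  | fuel + 1 =>
    let w := (PySem.List.pyGet? words wd).getD ""
    let result : Int := if firstLetter == pvLast w then acc else 0
    let lastLetter := pvLast w
    let st := (startsWith.getD lastLetter []).foldl
      (fun (st : List Bool × Bool × Int) wd0 =>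
        if !((PySem.List.pyGet? st.1 wd0).getD true) && wd < wd0 then
          let vis1 := PySem.List.pySetD st.1 wd0 true
          let w0 := (PySem.List.pyGet? words wd0).getD ""
          let r := max st.2.2 (dfsA fuel wd0 (acc + pvLen w0) firstLetter vis1 words startsWith)
          (PySem.List.pySetD vis1 wd0 false, true, r)
        else st)
      (visited, false, result)
    st.2.2

def solve (words : List String) : Int :=
  let startsWith := (PySem.List.enumerate words).foldl
    (fun d p => d.modify (pvFirst p.2) [] (· ++ [p.1])) PySem.Dict.empty
  let visited := words.map (fun _ => false)
  let st := (PySem.List.enumerate words).foldl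
    (fun (st : List Bool × Int) p =>
      let vis1 := PySem.List.pySetD st.1 p.1 true
      let w := (PySem.List.pyGet? words p.1).getD ""
      let r := max st.2 (dfsA (words.length + 1) p.1 (pvLen w) (pvFirst w) vis1 words startsWith)
      (PySem.List.pySetD vis1 p.1 false, r))
    (visited, 0)
  st.2

-- ===== PORT B =====
-- _cand(best, last, L, t) of Source B
def altCand (best : PySem.Dict (Char × Char) Int) (lastL : Char) (L : Int) (t : Char) : Int :=
  let v := best.getD (lastL, t) 0
  let c := if 0 < v then L + v else 0
  if t == lastL then max c L else c

-- body of B's main loop (one word of the right-to-left DP pass)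
def altStep (letters : List Char) (st : PySem.Dict (Char × Char) Int × Int) (w : String) :
    PySem.Dict (Char × Char) Int × Int :=
  let best := st.1
  let first := pvFirst w
  let lastL := pvLast w
  let L := pvLen w
  let g := letters.foldl (fun (g : PySem.Dict Char Int) t =>
      let c := altCand best lastL L t
      if 0 < c then g.insert t c else g)
    PySem.Dict.empty
  let a := g.getD first 0
  let ans := if st.2 < a then a else st.2
  let best' := letters.foldl (fun (b : PySem.Dict (Char × Char) Int) t =>
      let u := g.getD t 0
      if b.getD (first, t) 0 < u then b.insert (first, t) u else b)
    best
  (best', ans)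

def solve_alt (words : List String) : Int :=
  let letters := words.foldl (fun ls w =>
    [pvFirst w, pvLast w].foldl (fun ls ch => PySem.Set.add ls ch) ls) PySem.Set.empty
  (words.reverse.foldl (altStep letters) (PySem.Dict.empty, 0)).2

-- ===== PRECONDITION & SPEC =====
-- Pre_ excludes lists containing an empty word: A raises IndexError on wd[0] there (and B raises too).
def Pre_solve (words : List String) : Prop := ∀ w ∈ words, w ≠ ""
instance (words : List String) : Decidable (Pre_solve words) := by unfold Pre_solve; infer_instance
def pvWitness_solve : List String := (["ab", "ba"])
def Spec_solve (words : List String) (out : Int) : Prop := out = solve_alt words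
instance (words : List String) (out : Int) : Decidable (Spec_solve words out) := by unfold Spec_solve; infer_instance

-- ===== CLAIM (what is proved, stated in full; the proofs are below) =====
def Claim_equal_solve : Prop := ∀ (words : List String), Dom_solve words → Pre_solve words → Spec_solve words (solve words)

-- ===== LEMMAS AND PROOFS =====

-- specification layer: dbest0 l c t = largest total length of a letter-chain inside l
-- whose first word starts with c and whose last word ends with t (0 if there is none)
def dbest0 : List String → Char → Char → Int
  | [], _, _ => 0
  | w :: l, c, t =>
    max (if pvFirst w = c then
           max (if pvLast w = t then pvLen w else 0)
               (if 0 < dbest0 l (pvLast w) t then pvLen w + dbest0 l (pvLast w) t else 0)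
         else 0)
        (dbest0 l c t)

-- gval w l t = largest total of a chain that starts exactly with w and then continues inside l
def gval (w : String) (l : List String) (t : Char) : Int :=
  max (if pvLast w = t then pvLen w else 0)
      (if 0 < dbest0 l (pvLast w) t then pvLen w + dbest0 l (pvLast w) t else 0)

def ansSpec : List String → Int
  | [] => 0
  | w :: l => max (ansSpec l) (gval w l (pvFirst w))

lemma pvLen_nonneg (s : String) : 0 ≤ pvLen s := by
  simp [pvLen, pysem]

lemma pvLen_pos (s : String) (h : s ≠ "") : 1 ≤ pvLen s := by
  have h1 : s.toList ≠ [] := by simpa [String.toList_eq_nil_iff] using h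
  have h2 : s.toList.length ≠ 0 := by simpa using h1
  have h3 : s.length = s.toList.length := rfl
  simp [pvLen, pysem]; omega

lemma dbest0_cons (w : String) (l : List String) (c t : Char) :
    dbest0 (w :: l) c t = max (if pvFirst w = c then gval w l t else 0) (dbest0 l c t) := rfl

lemma dbest0_nonneg (l : List String) (c t : Char) : 0 ≤ dbest0 l c t := by
  induction l generalizing c t with
  | nil => simp [dbest0]
  | cons w l ih => exact le_trans (ih c t) (le_max_right _ _)

lemma gval_nonneg (w : String) (l : List String) (t : Char) : 0 ≤ gval w l t := by
  have h1 := pvLen_nonneg w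
  have h2 := dbest0_nonneg l (pvLast w) t
  unfold gval
  split_ifs <;> omega

lemma ansSpec_nonneg (l : List String) : 0 ≤ ansSpec l := by
  induction l with
  | nil => simp [ansSpec]
  | cons w l ih => exact le_trans ih (le_max_left _ _)

lemma dbest0_pos_last (l : List String) (c t : Char) (h : 0 < dbest0 l c t) :
    ∃ w ∈ l, pvLast w = t := by
  induction l generalizing c with
  | nil => simp [dbest0] at h
  | cons w l ih =>
    rw [dbest0_cons] at h
    rcases lt_max_iff.mp h with h1 | h2
    · by_cases hf : pvFirst w = c
      · simp only [hf] at h1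
        unfold gval at h1
        rcases lt_max_iff.mp h1 with h3 | h4
        · by_cases hlw : pvLast w = t
          · exact ⟨w, List.mem_cons_self, hlw⟩
          · simp [hlw] at h3
        · by_cases hd : 0 < dbest0 l (pvLast w) t
          · obtain ⟨x, hx, hxt⟩ := ih (pvLast w) hd
            exact ⟨x, List.mem_cons_of_mem _ hx, hxt⟩
          · simp [hd] at h4
      · simp [hf] at h1
    · obtain ⟨x, hx, hxt⟩ := ih c h2
      exact ⟨x, List.mem_cons_of_mem _ hx, hxt⟩

-- ---- B side ----

lemma letters_mono (ws : List String) (ls : List Char) (x : Char) (hx : x ∈ ls) :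
    x ∈ ws.foldl (fun ls w => [pvFirst w, pvLast w].foldl (fun ls ch => PySem.Set.add ls ch) ls) ls := by
  induction ws generalizing ls with
  | nil => simpa using hx
  | cons v ws ih =>
    simp only [List.foldl_cons, List.foldl_nil]
    exact ih _ ((PySem.Set.mem_add _ _ _).mpr (Or.inl ((PySem.Set.mem_add _ _ _).mpr (Or.inl hx))))

lemma letters_mem (ws : List String) (ls : List Char) (w : String) (hw : w ∈ ws) :
    pvFirst w ∈ ws.foldl (fun ls w => [pvFirst w, pvLast w].foldl (fun ls ch => PySem.Set.add ls ch) ls) ls ∧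
    pvLast w ∈ ws.foldl (fun ls w => [pvFirst w, pvLast w].foldl (fun ls ch => PySem.Set.add ls ch) ls) ls := by
  induction ws generalizing ls with
  | nil => simp at hw
  | cons v ws ih =>
    rcases List.mem_cons.mp hw with hv | hw'
    · subst hv
      simp only [List.foldl_cons, List.foldl_nil]
      constructor
      · exact letters_mono ws _ _
          ((PySem.Set.mem_add _ _ _).mpr (Or.inl ((PySem.Set.mem_add _ _ _).mpr (Or.inr rfl))))
      · exact letters_mono ws _ _ ((PySem.Set.mem_add _ _ _).mpr (Or.inr rfl))
    · simp only [List.foldl_cons, List.foldl_nil]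
      exact ih _ hw'

lemma foldG_getD (ts : List Char) (C : Char → Int) (g : PySem.Dict Char Int) (t0 : Char) :
    (ts.foldl (fun g t => if 0 < C t then g.insert t (C t) else g) g).getD t0 0
      = if t0 ∈ ts ∧ 0 < C t0 then C t0 else g.getD t0 0 := by
  induction ts generalizing g with
  | nil => simp
  | cons t rest ih =>
    simp only [List.foldl_cons]
    rw [ih]
    by_cases hmem : t0 ∈ rest ∧ 0 < C t0
    · simp [hmem, List.mem_cons]
    · rw [if_neg hmem]
      by_cases ht : t0 = t
      · subst ht
        by_cases hp : 0 < C t0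
        · rw [if_pos hp, PySem.Dict.getD_insert, if_pos rfl, if_pos ⟨by simp, hp⟩]
        · rw [if_neg hp, if_neg (by simp [hp])]
      · by_cases hp : 0 < C t
        · rw [if_pos hp, PySem.Dict.getD_insert, if_neg ht,
            if_neg (by rintro ⟨hm, hc⟩; exact hmem ⟨(List.mem_cons.mp hm).resolve_left ht, hc⟩)]
        · rw [if_neg hp, if_neg (by rintro ⟨hm, hc⟩; exact hmem ⟨(List.mem_cons.mp hm).resolve_left ht, hc⟩)]

lemma foldBest_getD (ts : List Char) (first : Char) (G : Char → Int)
    (b : PySem.Dict (Char × Char) Int) (p0 : Char × Char) :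
    (ts.foldl (fun b t => if b.getD (first, t) 0 < G t then b.insert (first, t) (G t) else b) b).getD p0 0
      = if p0.1 = first ∧ p0.2 ∈ ts then max (b.getD p0 0) (G p0.2) else b.getD p0 0 := by
  induction ts generalizing b with
  | nil => simp
  | cons t rest ih =>
    simp only [List.foldl_cons]
    have h1 : ∀ p1 : Char × Char,
        (if b.getD (first, t) 0 < G t then b.insert (first, t) (G t) else b).getD p1 0
          = if p1 = (first, t) then max (b.getD (first, t) 0) (G t) else b.getD p1 0 := by
      intro p1
      by_cases hlt : b.getD (first, t) 0 < G t
      · rw [if_pos hlt, PySem.Dict.getD_insert]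
        by_cases hp : p1 = (first, t)
        · rw [if_pos hp, if_pos hp]; omega
        · rw [if_neg hp, if_neg hp]
      · rw [if_neg hlt]
        by_cases hp : p1 = (first, t)
        · rw [if_pos hp, hp]; omega
        · rw [if_neg hp]
    rw [ih, h1]
    by_cases hp : p0 = (first, t)
    · rw [if_pos hp]
      subst hp
      have hsnd : ((first, t) : Char × Char).2 = t := rfl
      by_cases hmem : t ∈ rest
      · rw [if_pos ⟨rfl, hmem⟩, if_pos ⟨rfl, List.mem_cons.mpr (Or.inl rfl)⟩, hsnd]; omega
      · rw [if_neg (by rintro ⟨_, h2'⟩; exact hmem h2'),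
          if_pos ⟨rfl, List.mem_cons.mpr (Or.inl rfl)⟩]
    · rw [if_neg hp]
      by_cases hmem : p0.1 = first ∧ p0.2 ∈ rest
      · rw [if_pos hmem, if_pos ⟨hmem.1, List.mem_cons.mpr (Or.inr hmem.2)⟩]
      · rw [if_neg hmem, if_neg (by
          rintro ⟨ha, hb⟩
          rcases List.mem_cons.mp hb with h2 | h2
          · exact hp (by rcases p0 with ⟨x, y⟩; simp at ha h2; simp [ha, h2])
          · exact hmem ⟨ha, h2⟩)]

lemma altCand_eq (l : List String) (best : PySem.Dict (Char × Char) Int) (w : String)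
    (hbest : ∀ c t, best.getD (c, t) 0 = dbest0 l c t) (t0 : Char) :
    altCand best (pvLast w) (pvLen w) t0 = gval w l t0 := by
  have hL0 := pvLen_nonneg w
  have hD0 := dbest0_nonneg l (pvLast w) t0
  unfold altCand gval
  simp only [hbest]
  by_cases ht : t0 = pvLast w
  · simp only [ht, beq_self_eq_true, if_true]
    split_ifs <;> omega
  · have hbeq : (t0 == pvLast w) = false := beq_eq_false_iff_ne.mpr ht
    have hne : ¬ (pvLast w = t0) := fun hh => ht hh.symm
    simp only [hbeq, Bool.false_eq_true, if_false, if_neg hne]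
    split_ifs <;> omega

lemma gval_pos_mem (letters : List Char) (l : List String) (w : String)
    (hw2 : pvLast w ∈ letters) (hl : ∀ x ∈ l, pvLast x ∈ letters)
    (t : Char) (h : 0 < gval w l t) : t ∈ letters := by
  unfold gval at h
  rcases lt_max_iff.mp h with h1 | h2
  · by_cases he : pvLast w = t
    · exact he ▸ hw2
    · simp [he] at h1
  · by_cases hd : 0 < dbest0 l (pvLast w) t
    · obtain ⟨x, hx, hxt⟩ := dbest0_pos_last l (pvLast w) t hd
      exact hxt ▸ hl x hx
    · simp [hd] at h2

lemma stepB (letters : List Char) (l : List String) (w : String)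
    (best : PySem.Dict (Char × Char) Int) (ans : Int)
    (hw : pvFirst w ∈ letters ∧ pvLast w ∈ letters)
    (hl : ∀ x ∈ l, pvLast x ∈ letters)
    (hbest : ∀ c t, best.getD (c, t) 0 = dbest0 l c t)
    (hans : ans = ansSpec l) :
    (∀ c t, (altStep letters (best, ans) w).1.getD (c, t) 0 = dbest0 (w :: l) c t) ∧
      (altStep letters (best, ans) w).2 = ansSpec (w :: l) := by
  simp only [altStep]
  have hg : ∀ t0, (letters.foldl (fun (g : PySem.Dict Char Int) t =>
      let c := altCand best (pvLast w) (pvLen w) t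
      if 0 < c then g.insert t c else g) PySem.Dict.empty).getD t0 0
      = if t0 ∈ letters then gval w l t0 else 0 := by
    intro t0
    have h1 := foldG_getD letters (fun t => altCand best (pvLast w) (pvLen w) t)
      PySem.Dict.empty t0
    have h2 : (if t0 ∈ letters ∧ 0 < altCand best (pvLast w) (pvLen w) t0
          then altCand best (pvLast w) (pvLen w) t0
          else (PySem.Dict.empty : PySem.Dict Char Int).getD t0 0)
        = if t0 ∈ letters then gval w l t0 else 0 := by
      rw [altCand_eq l best w hbest t0]
      have := gval_nonneg w l t0
      by_cases hm : t0 ∈ letters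
      · by_cases hp : 0 < gval w l t0
        · rw [if_pos ⟨hm, hp⟩, if_pos hm]
        · rw [if_neg (by rintro ⟨_, hq⟩; exact hp hq), if_pos hm]
          simp [PySem.Dict.getD_empty]; omega
      · rw [if_neg (by rintro ⟨hq, _⟩; exact hm hq), if_neg hm]
        simp [PySem.Dict.getD_empty]
    exact h1.trans h2
  refine ⟨?_, ?_⟩
  · intro c t
    have h3 := foldBest_getD letters (pvFirst w) (fun t =>
      ((letters.foldl (fun (g : PySem.Dict Char Int) t =>
        let c := altCand best (pvLast w) (pvLen w) t
        if 0 < c then g.insert t c else g) PySem.Dict.empty)).getD t 0) best ((c, t))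
    simp only at h3
    rw [h3, dbest0_cons]
    have hD := dbest0_nonneg l c t
    have hgv := gval_nonneg w l t
    by_cases hc : c = pvFirst w
    · subst hc
      by_cases hm : t ∈ letters
      · rw [if_pos ⟨rfl, hm⟩, hbest, hg, if_pos hm, if_pos rfl]
        omega
      · rw [if_neg (by rintro ⟨_, hq⟩; exact hm hq), hbest, if_pos rfl]
        have : ¬ 0 < gval w l t := fun hp => hm (gval_pos_mem letters l w hw.2 hl t hp)
        omega
    · rw [if_neg (by rintro ⟨hq, _⟩; exact hc hq), hbest,
        if_neg (fun hq => hc hq.symm)]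
      omega
  · simp only [hg, if_pos hw.1, hans]
    show (if ansSpec l < gval w l (pvFirst w) then gval w l (pvFirst w) else ansSpec l)
      = ansSpec (w :: l)
    have he : ansSpec (w :: l) = max (ansSpec l) (gval w l (pvFirst w)) := rfl
    rw [he]
    split_ifs <;> omega

lemma foldB (r : List String) (letters : List Char) (l : List String)
    (best : PySem.Dict (Char × Char) Int) (ans : Int)
    (hr : ∀ x ∈ r, pvFirst x ∈ letters ∧ pvLast x ∈ letters)
    (hl : ∀ x ∈ l, pvLast x ∈ letters)
    (hbest : ∀ c t, best.getD (c, t) 0 = dbest0 l c t)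
    (hans : ans = ansSpec l) :
    (r.foldl (altStep letters) (best, ans)).2 = ansSpec (r.reverse ++ l) := by
  induction r generalizing l best ans with
  | nil => simpa using hans
  | cons w r' ih =>
    simp only [List.foldl_cons]
    obtain ⟨h1, h2⟩ := stepB letters l w best ans (hr w (by simp)) hl hbest hans
    have hstep := ih (w :: l) (altStep letters (best, ans) w).1 (altStep letters (best, ans) w).2
      (fun x hx => hr x (List.mem_cons.mpr (Or.inr hx)))
      (fun x hx => by
        rcases List.mem_cons.mp hx with hx' | hx'
        · exact hx' ▸ (hr w (by simp)).2
        · exact hl x hx')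
      (fun c t => h1 c t) h2
    rw [hstep]
    simp [List.reverse_cons, List.append_assoc]


lemma solveB_eq (words : List String) :
    solve_alt words = ansSpec words := by
  simp only [solve_alt]
  have hfb := foldB words.reverse
    (words.foldl (fun ls w => [pvFirst w, pvLast w].foldl (fun ls ch => PySem.Set.add ls ch) ls)
      PySem.Set.empty) [] PySem.Dict.empty 0
    (fun x hx => letters_mem words PySem.Set.empty x (List.mem_reverse.mp hx))
    (by simp)
    (fun c t => by simp [dbest0, PySem.Dict.getD_empty])
    rfl
  simpa using hfb

-- ---- A side ----

def watW (words : List String) (k : Nat) : String := words.getD k ""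

def swlA (words : List String) (c : Char) : List Int :=
  (PySem.List.pyRange 0 (words.length : Int) 1).filter
    (fun j => pvFirst (PySem.List.pyGetD words j "") == c)

def dvalA (words : List String) (t : Char) (acc : Int) (j : Int) : Int :=
  if 0 < gval (watW words j.toNat) (words.drop (j.toNat + 1)) t
  then acc + gval (watW words j.toNat) (words.drop (j.toNat + 1)) t else 0

lemma sw_char (words : List String) (c : Char) :
    ((PySem.List.enumerate words).foldl
        (fun d p => d.modify (pvFirst p.2) [] (· ++ [p.1])) PySem.Dict.empty).getD c []
      = swlA words c := by
  rw [show ((PySem.List.enumerate words).foldl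
        (fun d p => d.modify (pvFirst p.2) [] (· ++ [p.1])) PySem.Dict.empty)
      = (((PySem.List.enumerate words).map (fun p => (pvFirst p.2, p.1))).foldl
        (fun d q => d.modify q.1 [] (· ++ [q.2])) PySem.Dict.empty) from by rw [List.foldl_map]]
  rw [PySem.Dict.getD_foldl_modify_append]
  rw [PySem.List.enumerate_eq_map_pyRange (d := "")]
  simp only [List.filter_map, List.map_map, PySem.Dict.getD_empty, List.nil_append]
  unfold swlA
  simp [Function.comp_def, PySem.List.len_eq]

lemma set_self_of_getElem? {α : Type} (l : List α) (n : Nat) (a : α) (h : l[n]? = some a) :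
    l.set n a = l := by
  apply List.ext_getElem?
  intro i
  rw [List.getElem?_set]
  by_cases hi : n = i
  · subst hi
    obtain ⟨hlt, hv⟩ := List.getElem?_eq_some_iff.mp h
    simp [hlt, hv]
  · rw [if_neg hi]

lemma foldl_if_filter {α : Type} (lst : List α) (Q : α → Prop) [DecidablePred Q]
    (G : α → Int) (a : Int) :
    lst.foldl (fun r x => if Q x then max r (G x) else r) a
      = (lst.filter (fun x => decide (Q x))).foldl (fun r x => max r (G x)) a := by
  induction lst generalizing a with
  | nil => rfl
  | cons x rest ih =>
    by_cases hx : Q x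
    · simp only [List.foldl_cons, List.filter_cons, if_pos hx, decide_eq_true hx, if_true,
        List.foldl_cons]
      simp only [ih]
    · simp only [List.foldl_cons, List.filter_cons, if_neg hx, decide_eq_false hx,
        Bool.false_eq_true, if_false]
      simp only [ih]

lemma swl_filter_gt (words : List String) (c : Char) (wd : Nat) (hwd : wd < words.length) :
    (swlA words c).filter (fun j => decide ((wd : Int) < j))
      = (PySem.List.pyRange ((wd : Int) + 1) (words.length : Int) 1).filter
          (fun j => pvFirst (PySem.List.pyGetD words j "") == c) := by
  unfold swlA
  rw [List.filter_filter]
  rw [PySem.List.pyRange_one_append 0 ((wd : Int) + 1) (words.length : Int) (by omega)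
    (by exact_mod_cast Nat.succ_le_of_lt hwd)]
  rw [List.filter_append]
  have h1 : (PySem.List.pyRange 0 ((wd : Int) + 1) 1).filter
      (fun a => decide ((wd : Int) < a) && (pvFirst (PySem.List.pyGetD words a "") == c)) = [] := by
    apply List.filter_eq_nil_iff.mpr
    intro j hj
    have hb := (PySem.List.mem_pyRange_one).mp hj
    simp only [Bool.and_eq_true, decide_eq_true_eq, not_and]
    intro _
    omega
  have h2 : (PySem.List.pyRange ((wd : Int) + 1) (words.length : Int) 1).filter
      (fun a => decide ((wd : Int) < a) && (pvFirst (PySem.List.pyGetD words a "") == c))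
      = (PySem.List.pyRange ((wd : Int) + 1) (words.length : Int) 1).filter
        (fun j => pvFirst (PySem.List.pyGetD words j "") == c) := by
    apply List.filter_congr
    intro j hj
    have hb := (PySem.List.mem_pyRange_one).mp hj
    have hd : decide ((wd : Int) < j) = true := decide_eq_true (by omega)
    rw [hd, Bool.true_and]
  rw [h1, h2, List.nil_append]

lemma db_fold (words : List String) (t : Char) (acc : Int) (hacc : 1 ≤ acc) (c : Char) :
    ∀ (k m : Nat), m + k = words.length → ∀ a : Int, 0 ≤ a →
    ((PySem.List.pyRange (m : Int) (words.length : Int) 1).filter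
        (fun j => pvFirst (PySem.List.pyGetD words j "") == c)).foldl
        (fun r j => max r (dvalA words t acc j)) a
      = max a (if 0 < dbest0 (words.drop m) c t then acc + dbest0 (words.drop m) c t else 0) := by
  intro k
  induction k with
  | zero =>
    intro m hm a ha
    have hmn : m = words.length := by omega
    subst hmn
    rw [PySem.List.pyRange_one_eq_nil (by omega), List.drop_length]
    simp only [List.filter_nil, List.foldl_nil, dbest0]
    omega
  | succ k ih =>
    intro m hm a ha
    have hmlt : m < words.length := by omega
    have hmn : (m : Int) < (words.length : Int) := by exact_mod_cast hmlt
    rw [PySem.List.pyRange_one_cons hmn]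
    have hcast : (m : Int) + 1 = ((m + 1 : Nat) : Int) := by push_cast; ring
    have hwat : PySem.List.pyGetD words (m : Int) "" = watW words m := by
      simp [pysem, watW]
    have hdrop : words.drop m = watW words m :: words.drop (m + 1) := by
      rw [List.drop_eq_getElem_cons hmlt]
      congr 1
      rw [watW, List.getD_eq_getElem words "" hmlt]
    have hg0 := gval_nonneg (watW words m) (words.drop (m + 1)) t
    have hD0 := dbest0_nonneg (words.drop (m + 1)) c t
    have hdval : dvalA words t acc (m : Int)
        = (if 0 < gval (watW words m) (words.drop (m + 1)) t
           then acc + gval (watW words m) (words.drop (m + 1)) t else 0) := by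
      unfold dvalA
      simp
    have hdv0 : 0 ≤ dvalA words t acc (m : Int) := by
      rw [hdval]; split_ifs <;> omega
    rw [List.filter_cons]
    by_cases hP : pvFirst (PySem.List.pyGetD words (m : Int) "") == c
    · rw [if_pos hP]
      rw [List.foldl_cons, hcast, ih (m + 1) (by omega) _ (by omega)]
      have hPf : pvFirst (watW words m) = c := by
        rw [← hwat]; exact beq_iff_eq.mp hP
      rw [hdrop, dbest0_cons, hPf, if_pos rfl, hdval]
      split_ifs <;> omega
    · rw [if_neg hP]
      rw [hcast, ih (m + 1) (by omega) a ha]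
      have hPf : ¬ (pvFirst (watW words m) = c) := by
        rw [← hwat]; exact fun hq => hP (beq_iff_eq.mpr hq)
      rw [hdrop, dbest0_cons, if_neg hPf]
      have : max (0 : Int) (dbest0 (words.drop (m + 1)) c t) = dbest0 (words.drop (m + 1)) c t := by
        omega
      rw [this]

lemma dfs_eval (words : List String) (sw : PySem.Dict Char (List Int))
    (hsw : ∀ c, sw.getD c [] = swlA words c)
    (hpre : ∀ w ∈ words, w ≠ "") (t : Char) :
    ∀ (fuel : Nat) (wd : Nat) (acc : Int) (vis : List Bool),
      wd < words.length → words.length - wd ≤ fuel →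
      vis.length = words.length →
      (∀ k : Nat, wd < k → k < words.length → vis[k]? = some false) →
      1 ≤ acc →
      dfsA fuel (wd : Int) acc t vis words sw
        = (if 0 < gval (watW words wd) (words.drop (wd + 1)) t
           then acc - pvLen (watW words wd) + gval (watW words wd) (words.drop (wd + 1)) t
           else 0) := by
  intro fuel
  induction fuel with
  | zero => intro wd acc vis hwd hfuel _ _ _; omega
  | succ fuel ih =>
    intro wd acc vis hwd hfuel hlen hvis hacc
    have hwat : (PySem.List.pyGet? words ((wd : Nat) : Int)).getD "" = watW words wd := by
      rw [PySem.List.pyGet?_natCast, watW, List.getD_eq_getElem?_getD]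
    simp only [dfsA]
    rw [hwat, hsw]
    have hfold : ∀ (lst : List Int), (∀ j ∈ lst, 0 ≤ j ∧ j < (words.length : Int)) →
        ∀ (vis' : List Bool) (found : Bool) (res : Int), vis'.length = words.length →
        (∀ k : Nat, wd < k → k < words.length → vis'[k]? = some false) →
        (List.foldl
          (fun (st : List Bool × Bool × Int) wd0 =>
            if (!(PySem.List.pyGet? st.1 wd0).getD true && decide ((wd : Int) < wd0)) = true then
              (PySem.List.pySetD (PySem.List.pySetD st.1 wd0 true) wd0 false, true,
                max st.2.2
                  (dfsA fuel wd0 (acc + pvLen ((PySem.List.pyGet? words wd0).getD "")) t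
                    (PySem.List.pySetD st.1 wd0 true) words sw))
            else st)
          (vis', found, res) lst).1 = vis' ∧
        (List.foldl
          (fun (st : List Bool × Bool × Int) wd0 =>
            if (!(PySem.List.pyGet? st.1 wd0).getD true && decide ((wd : Int) < wd0)) = true then
              (PySem.List.pySetD (PySem.List.pySetD st.1 wd0 true) wd0 false, true,
                max st.2.2
                  (dfsA fuel wd0 (acc + pvLen ((PySem.List.pyGet? words wd0).getD "")) t
                    (PySem.List.pySetD st.1 wd0 true) words sw))
            else st)
          (vis', found, res) lst).2.2
          = List.foldl (fun r j => if (wd : Int) < j then max r (dvalA words t acc j) else r) res lst := by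
      intro lst
      induction lst with
      | nil => intro _ vis' found res _ _; exact ⟨rfl, rfl⟩
      | cons j rest ihl =>
        intro hb vis' found res hlen' hvis'
        obtain ⟨hj0, hjlt⟩ := hb j List.mem_cons_self
        have hbrest : ∀ x ∈ rest, 0 ≤ x ∧ x < (words.length : Int) :=
          fun x hx => hb x (List.mem_cons_of_mem _ hx)
        by_cases hlt : (wd : Int) < j
        · have hjn : wd < j.toNat := by omega
          have hjn2 : j.toNat < words.length := by omega
          have hget : (PySem.List.pyGet? vis' j).getD true = false := by
            rw [PySem.List.pyGet?_of_nonneg vis' hj0, hvis' j.toNat hjn hjn2]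
            rfl
          have hset1 : PySem.List.pySetD vis' j true = vis'.set j.toNat true :=
            PySem.List.pySetD_of_nonneg vis' true hj0
          have hw0 : (PySem.List.pyGet? words j).getD "" = watW words j.toNat := by
            rw [PySem.List.pyGet?_of_nonneg words hj0, watW, List.getD_eq_getElem?_getD]
          have hdfs : dfsA fuel j (acc + pvLen ((PySem.List.pyGet? words j).getD "")) t
              (PySem.List.pySetD vis' j true) words sw = dvalA words t acc j := by
            rw [hw0, hset1]
            rw [show j = ((j.toNat : Nat) : Int) from (Int.toNat_of_nonneg hj0).symm]
            simp only [Int.toNat_natCast]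
            rw [ih j.toNat (acc + pvLen (watW words j.toNat)) (vis'.set j.toNat true) hjn2
              (by omega) (by simp [hlen']) (fun k hk1 hk2 => by
                rw [List.getElem?_set_ne (by omega)]
                exact hvis' k (by omega) hk2)
              (by have := pvLen_nonneg (watW words j.toNat); omega)]
            unfold dvalA
            simp only [Int.toNat_natCast]
            split_ifs <;> omega
          have hrestore : PySem.List.pySetD (PySem.List.pySetD vis' j true) j false = vis' := by
            rw [hset1, PySem.List.pySetD_of_nonneg _ false hj0, List.set_set]
            exact set_self_of_getElem? _ _ _ (hvis' j.toNat hjn hjn2)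
          simp only [List.foldl_cons]
          rw [if_pos (by rw [hget]; simp [hlt]), if_pos hlt]
          rw [hdfs, hrestore]
          exact ihl hbrest vis' true (max res (dvalA words t acc j)) hlen' hvis'
        · simp only [List.foldl_cons]
          rw [if_neg (by simp [hlt]), if_neg hlt]
          exact ihl hbrest vis' found res hlen' hvis'
    have hbounds : ∀ j ∈ swlA words (pvLast (watW words wd)), 0 ≤ j ∧ j < (words.length : Int) := by
      intro j hj
      unfold swlA at hj
      have := (PySem.List.mem_pyRange_one).mp (List.mem_of_mem_filter hj)
      omega
    rw [(hfold (swlA words (pvLast (watW words wd))) hbounds vis false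
      (if (t == pvLast (watW words wd)) = true then acc else 0) hlen hvis).2]
    rw [foldl_if_filter (swlA words (pvLast (watW words wd))) (fun j => (wd : Int) < j)
      (fun j => dvalA words t acc j) _]
    rw [swl_filter_gt words (pvLast (watW words wd)) wd hwd]
    have h0res : (0 : Int) ≤ (if (t == pvLast (watW words wd)) = true then acc else 0) := by
      split_ifs <;> omega
    rw [show ((wd : Int) + 1) = ((wd + 1 : Nat) : Int) from by push_cast; ring]
    rw [db_fold words t acc hacc (pvLast (watW words wd)) (words.length - (wd + 1)) (wd + 1)
      (by omega) _ h0res]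
    have hmem : watW words wd ∈ words := by
      rw [watW, List.getD_eq_getElem words "" hwd]
      exact List.getElem_mem hwd
    have hL := pvLen_pos (watW words wd) (hpre _ hmem)
    have hD0 := dbest0_nonneg (words.drop (wd + 1)) (pvLast (watW words wd)) t
    unfold gval
    by_cases hbt : (t == pvLast (watW words wd)) = true
    · have ht : pvLast (watW words wd) = t := (beq_iff_eq.mp hbt).symm
      rw [if_pos hbt, if_pos ht]
      split_ifs <;> omega
    · have ht : ¬ (pvLast (watW words wd) = t) := fun hq => hbt (beq_iff_eq.mpr hq.symm)
      rw [if_neg hbt, if_neg ht]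
      split_ifs <;> omega

lemma solveA_eq (words : List String) (h : ∀ w ∈ words, w ≠ "") :
    solve words = ansSpec words := by
  simp only [solve]
  generalize hswg : (List.foldl (fun d p => d.modify (pvFirst p.2) [] fun x => x ++ [p.1])
      PySem.Dict.empty (PySem.List.enumerate words)) = SW
  have hsw : ∀ c, SW.getD c [] = swlA words c := fun c => hswg ▸ sw_char words c
  have houter : ∀ (k m : Nat), m + k = words.length →
      ∀ (vis : List Bool) (res : Int), vis.length = words.length →
      (∀ j : Nat, j < words.length → vis[j]? = some false) → 0 ≤ res →
      ((PySem.List.enumerate (words.drop m) (m : Int)).foldl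
        (fun (st : List Bool × Int) p =>
          (PySem.List.pySetD (PySem.List.pySetD st.1 p.1 true) p.1 false,
            max st.2
              (dfsA (words.length + 1) p.1 (pvLen ((PySem.List.pyGet? words p.1).getD ""))
                (pvFirst ((PySem.List.pyGet? words p.1).getD "")) (PySem.List.pySetD st.1 p.1 true)
                words SW))) (vis, res)).2
        = max res (ansSpec (words.drop m)) := by
    intro k
    induction k with
    | zero =>
      intro m hm vis res hlen hvis hres
      have hmn : m = words.length := by omega
      subst hmn
      rw [List.drop_length]
      simp only [PySem.List.enumerate_nil, List.foldl_nil, ansSpec]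
      omega
    | succ k ihk =>
      intro m hm vis res hlen hvis hres
      have hmlt : m < words.length := by omega
      have hdrop : words.drop m = watW words m :: words.drop (m + 1) := by
        rw [List.drop_eq_getElem_cons hmlt]
        congr 1
        rw [watW, List.getD_eq_getElem words "" hmlt]
      rw [hdrop, PySem.List.enumerate_cons, List.foldl_cons]
      have hwatm : (PySem.List.pyGet? words ((m : Nat) : Int)).getD "" = watW words m := by
        rw [PySem.List.pyGet?_natCast, watW, List.getD_eq_getElem?_getD]
      have hmem : watW words m ∈ words := by
        rw [watW, List.getD_eq_getElem words "" hmlt]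
        exact List.getElem_mem hmlt
      have hL := pvLen_pos (watW words m) (h _ hmem)
      have hset : PySem.List.pySetD vis ((m : Nat) : Int) true = vis.set m true := by
        rw [PySem.List.pySetD_natCast]
      have hdfs : dfsA (words.length + 1) ((m : Nat) : Int) (pvLen (watW words m))
          (pvFirst (watW words m)) (vis.set m true) words SW
          = gval (watW words m) (words.drop (m + 1)) (pvFirst (watW words m)) := by
        rw [dfs_eval words SW hsw h (pvFirst (watW words m)) (words.length + 1) m
          (pvLen (watW words m)) (vis.set m true) hmlt (by omega) (by simp [hlen])
          (fun k hk1 hk2 => by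
            rw [List.getElem?_set_ne (by omega)]
            exact hvis k hk2) hL]
        have := gval_nonneg (watW words m) (words.drop (m + 1)) (pvFirst (watW words m))
        split_ifs <;> omega
      have hrestore : PySem.List.pySetD (vis.set m true) ((m : Nat) : Int) false = vis := by
        rw [PySem.List.pySetD_natCast, List.set_set]
        exact set_self_of_getElem? _ _ _ (hvis m hmlt)
      simp only
      rw [hwatm, hset, hdfs, hrestore]
      have hg0 := gval_nonneg (watW words m) (words.drop (m + 1)) (pvFirst (watW words m))
      rw [show ((m : Nat) : Int) + 1 = ((m + 1 : Nat) : Int) from by push_cast; ring]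
      rw [ihk (m + 1) (by omega) vis
        (max res (gval (watW words m) (words.drop (m + 1)) (pvFirst (watW words m)))) hlen hvis
        (by omega)]
      have hanscons : ansSpec (watW words m :: words.drop (m + 1))
          = max (ansSpec (words.drop (m + 1)))
              (gval (watW words m) (words.drop (m + 1)) (pvFirst (watW words m))) := rfl
      rw [hanscons]
      omega
  have happ := houter words.length 0 (by omega) (List.map (fun _ => false) words) 0
    (by simp) (fun j hj => by
      rw [List.getElem?_map, List.getElem?_eq_getElem hj]
      rfl) le_rfl
  simp only [List.drop_zero, Nat.cast_zero] at happ
  rw [happ]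
  have := ansSpec_nonneg words
  omega

-- ===== VERDICT (by name: the statement is the Claim_ definition above) =====
theorem solve_spec : Claim_equal_solve := by
  intro words _ hpre
  unfold Spec_solve
  rw [solveA_eq words hpre, solveB_eq words]
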